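-- pv_equiv track=rewrite | github.com/JoshTheBlack/Project-Euler-Solutions | 051.py | primesWithRepeatedDigitsSearch
-- ===== SOURCE A (Python) =====
-- def primesWithRepeatedDigitsSearch(primes):
--     repeatedDigitsQuantity = [3,5,6,7,8,9]
--     for prime in primes:
--         import collections
--         d = collections.defaultdict(int)
--         for c in str(prime):
--             d[c] += 1
--         for c in sorted(d, key=d.get, reverse=True):
--             if d[c] in repeatedDigitsQuantity:
--                 places = []
--                 count = 0
--                 for digit in str(prime):
--                     if digit == c:
--                         places.append(count)
--                     count += 1
--                 yield prime, places
-- ===== SOURCE B (Python) =====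
-- def primesWithRepeatedDigitsSearch(primes):
--     for prime in primes:
--         positions = {}
--         for i, c in enumerate(str(prime)):
--             positions.setdefault(c, []).append(i)
--         # no sort: counts come from a tiny fixed set; walking its values in descending order over the first-appearance index reproduces the
--         # stable frequency-descending order without any comparison sort.
--         for cnt in (9, 8, 7, 6, 5, 3):
--             for places in positions.values():
--                 if len(places) == cnt:
--                     yield prime, places
-- ===== Notes on version B (the rewrite author's own statement) =====
-- stated objective: alternative
-- what changed: B eliminates A's comparison sort of digits by frequency: it builds a digit->positions index in one enumerate pass and then emits buckets by walking the six admissible repetition counts in descending order over the index, a pigeonhole/bucket pass that reproduces the stable frequency-descending order without sorting and without A's per-digit rescans of str(prime).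
import Mathlib
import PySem

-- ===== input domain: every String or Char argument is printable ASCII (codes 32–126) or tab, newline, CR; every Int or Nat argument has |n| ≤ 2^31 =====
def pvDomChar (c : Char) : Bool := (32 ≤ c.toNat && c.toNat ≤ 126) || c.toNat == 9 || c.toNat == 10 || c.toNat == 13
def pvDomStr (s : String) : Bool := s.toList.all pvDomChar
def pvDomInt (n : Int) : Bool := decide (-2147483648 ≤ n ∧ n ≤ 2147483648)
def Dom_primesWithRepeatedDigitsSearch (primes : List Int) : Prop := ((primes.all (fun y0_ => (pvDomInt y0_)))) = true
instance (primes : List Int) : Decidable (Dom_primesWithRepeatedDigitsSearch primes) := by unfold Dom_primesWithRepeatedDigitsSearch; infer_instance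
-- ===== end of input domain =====

-- B removes A's comparison sort of digits by frequency: it builds a digit→positions index in
-- one enumerate pass and emits buckets by walking the six wanted counts in descending
-- order over the index, which reproduces the stable frequency-descending order without sorting
-- and without A's per-digit rescans (objective: alternative). Both functions are total.

-- ===== PORT A =====
-- d = defaultdict(int); for c in str(prime): d[c] += 1
def pvCountA (cs : List Char) : PySem.Dict Char Int :=
  cs.foldl (fun d c => d.modify c 0 (· + 1)) PySem.Dict.empty

-- places = []; count = 0; for digit in str(prime): if digit == c: places.append(count); count += 1
def pvPlacesA (cs : List Char) (c : Char) : List Int :=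
  (cs.foldl (fun (st : List Int × Int) digit =>
      (if digit == c then st.1 ++ [st.2] else st.1, st.2 + 1)) ([], 0)).1

-- body of A's outer loop: the yields appended to the output so far
def pvLoopA (prime : Int) (out : List (Int × List Int)) : List (Int × List Int) :=
  let repeatedDigitsQuantity : List Int := [3, 5, 6, 7, 8, 9]
  let cs := (PySem.Int.toStr prime).toList
  let d := pvCountA cs
  (PySem.List.sorted d.keys (fun c => d.getD c 0) true).foldl (fun out c =>
    if repeatedDigitsQuantity.contains (d.getD c 0) then
      out ++ [(prime, pvPlacesA cs c)]
    else out) out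

def primesWithRepeatedDigitsSearch (primes : List Int) : List (Int × List Int) :=
  primes.foldl (fun out prime => pvLoopA prime out) []

-- ===== PORT B =====
-- positions = {}; for i, c in enumerate(str(prime)): positions.setdefault(c, []).append(i)
def pvPosB (cs : List Char) : PySem.Dict Char (List Int) :=
  (PySem.List.enumerate cs).foldl (fun d p => d.modify p.2 [] (· ++ [p.1])) PySem.Dict.empty

-- for cnt in (9,8,7,6,5,3): for places in positions.values(): if len(places) == cnt: yield
def pvLoopB (prime : Int) : List (Int × List Int) :=
  let pos := pvPosB (PySem.Int.toStr prime).toList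
  ([9, 8, 7, 6, 5, 3] : List Int).flatMap (fun cnt =>
    pos.values.flatMap (fun places =>
      if ((places.length : Int) == cnt) then [(prime, places)] else []))

def primesWithRepeatedDigitsSearch_alt (primes : List Int) : List (Int × List Int) :=
  primes.flatMap pvLoopB

-- ===== PRECONDITION & SPEC =====
def Spec_primesWithRepeatedDigitsSearch (primes : List Int) (out : List (Int × List Int)) : Prop := out = primesWithRepeatedDigitsSearch_alt primes
instance (primes : List Int) (out : List (Int × List Int)) : Decidable (Spec_primesWithRepeatedDigitsSearch primes out) := by unfold Spec_primesWithRepeatedDigitsSearch; infer_instance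

-- ===== CLAIM (what is proved, stated in full; the proofs are below) =====
def Claim_equal_primesWithRepeatedDigitsSearch : Prop := ∀ (primes : List Int), Dom_primesWithRepeatedDigitsSearch primes → Spec_primesWithRepeatedDigitsSearch primes (primesWithRepeatedDigitsSearch primes)

-- ===== LEMMAS AND PROOFS =====

-- ---- B's index characterized ----

theorem pvPosB_getD_aux (c : Char) :
    ∀ (l : List (Int × Char)) (d : PySem.Dict Char (List Int)),
      (l.foldl (fun d p => d.modify p.2 [] (· ++ [p.1])) d).getD c []
        = d.getD c [] ++ (l.filter (fun p => p.2 == c)).map (·.1) := by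
  intro l
  induction l with
  | nil => intro d; simp
  | cons p t ih =>
    intro d
    simp only [List.foldl_cons, ih, List.filter_cons]
    by_cases h : p.2 = c
    · simp [h]
    · simp [h, PySem.Dict.getD_modify, Ne.symm h]

theorem pvPosB_getD (cs : List Char) (c : Char) :
    (pvPosB cs).getD c []
      = ((PySem.List.enumerate cs).filter (fun p => p.2 == c)).map (·.1) := by
  simp [pvPosB, pvPosB_getD_aux]

-- A's inner rescan computes the same index list.
theorem pvPlacesA_aux (c : Char) :
    ∀ (cs : List Char) (acc : List Int) (n : Int),
      (cs.foldl (fun (st : List Int × Int) digit =>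
          (if digit == c then st.1 ++ [st.2] else st.1, st.2 + 1)) (acc, n)).1
        = acc ++ ((PySem.List.enumerate cs n).filter (fun p => p.2 == c)).map (·.1) := by
  intro cs
  induction cs with
  | nil => intro acc n; simp [PySem.List.enumerate_nil]
  | cons x t ih =>
    intro acc n
    rw [List.foldl_cons]
    by_cases h : x = c
    · have hstep : ((if (x == c) = true then (acc, n).1 ++ [(acc, n).2] else (acc, n).1,
          (acc, n).2 + 1) : List Int × Int) = (acc ++ [n], n + 1) := by simp [h]
      rw [hstep, ih, PySem.List.enumerate_cons, List.filter_cons]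
      simp [h]
    · have hstep : ((if (x == c) = true then (acc, n).1 ++ [(acc, n).2] else (acc, n).1,
          (acc, n).2 + 1) : List Int × Int) = (acc, n + 1) := by simp [h]
      rw [hstep, ih, PySem.List.enumerate_cons, List.filter_cons]
      simp [h]

theorem pvPlacesA_eq (cs : List Char) (c : Char) :
    pvPlacesA cs c = (pvPosB cs).getD c [] := by
  rw [pvPlacesA, pvPlacesA_aux c cs [] 0, pvPosB_getD]
  simp

-- the grouped list's length is the digit's multiplicity
theorem pvPosB_length_aux (c : Char) :
    ∀ (cs : List Char) (n : Int),
      (((PySem.List.enumerate cs n).filter (fun p => p.2 == c)).map (·.1)).length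
        = cs.count c := by
  intro cs
  induction cs with
  | nil => intro n; simp [PySem.List.enumerate_nil]
  | cons x t ih =>
    intro n
    simp only [PySem.List.enumerate_cons, List.filter_cons]
    by_cases h : x = c
    · simp [h, ih]
    · simp [h, ih]

theorem pvPosB_length (cs : List Char) (c : Char) :
    (((pvPosB cs).getD c []).length : Int) = (cs.count c : Int) := by
  rw [pvPosB_getD, pvPosB_length_aux]

theorem pvCountA_eq (cs : List Char) : pvCountA cs = PySem.Dict.counter cs := by
  simp [pvCountA, PySem.Dict.counter_eq_foldl]

-- the two dicts list the same keys in the same order (first appearance)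
theorem pvKeysB_eq (cs : List Char) : (pvPosB cs).keys = PySem.Set.ofList cs := by
  have hB : (pvPosB cs).keys
      = PySem.Set.update (PySem.Dict.empty : PySem.Dict Char (List Int)).keys
          ((PySem.List.enumerate cs).map (fun p => p.2)) :=
    PySem.Dict.keys_foldl_modify_key (PySem.List.enumerate cs) (fun p => p.2) []
      (fun _ p v => v ++ [p.1]) PySem.Dict.empty
  rw [hB, PySem.List.map_snd_enumerate]
  exact PySem.Set.update_nil_left cs

theorem pvKeysB_nodup (cs : List Char) : (pvPosB cs).keys.Nodup := by
  rw [pvKeysB_eq]; exact PySem.Set.nodup_ofList cs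

-- ---- the descending count ladder ----

def pvDesc : Nat → List Int
  | 0 => []
  | n + 1 => ((n + 1 : Nat) : Int) :: pvDesc n

theorem pvDesc_mem : ∀ (n : Nat) (v : Int), v ∈ pvDesc n ↔ 1 ≤ v ∧ v ≤ (n : Int) := by
  intro n
  induction n with
  | zero => intro v; simp [pvDesc]; omega
  | succ m ih => intro v; simp [pvDesc, ih]; omega

theorem pvDesc_pairwise : ∀ (n : Nat), (pvDesc n).Pairwise (fun a b => b < a) := by
  intro n
  induction n with
  | zero => exact List.Pairwise.nil
  | succ m ih =>
    refine List.pairwise_cons.mpr ⟨?_, ih⟩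
    intro v hv
    have := (pvDesc_mem m v).mp hv
    push_cast
    omega

-- ---- a stable descending insertion sort is a bucket concatenation ----

theorem pvInsertBy_skip {α : Type} (before : α → α → Bool) (x : α) :
    ∀ (pre suf : List α), (∀ y ∈ pre, before x y = false) →
      PySem.List.insertBy before x (pre ++ suf) = pre ++ PySem.List.insertBy before x suf := by
  intro pre
  induction pre with
  | nil => intro suf _; simp
  | cons y t ih =>
    intro suf h
    have hy : before x y = false := h y (by simp)
    simp only [List.cons_append, PySem.List.insertBy, hy]
    simp [ih suf (fun z hz => h z (by simp [hz]))]

theorem pvInsertBy_front {α : Type} (before : α → α → Bool) (x : α) :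
    ∀ (ys : List α), (∀ y ∈ ys, before x y = true) →
      PySem.List.insertBy before x ys = x :: ys := by
  intro ys h
  cases ys with
  | nil => rfl
  | cons y t => simp [PySem.List.insertBy, h y (by simp)]

theorem pvInsert_bucket {α : Type} (k : α → Int) (x : α) :
    ∀ (vs : List Int) (f : Int → List α),
      vs.Pairwise (fun a b => b < a) → k x ∈ vs →
      (∀ v ∈ vs, ∀ y ∈ f v, k y = v) →
      PySem.List.insertBy (fun a b => decide (k b < k a)) x (vs.flatMap f)
        = vs.flatMap (fun v => if v = k x then f v ++ [x] else f v) := by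
  intro vs
  induction vs with
  | nil => intro f _ hx _; simp at hx
  | cons v vs' ih =>
    intro f hp hx hf
    have hlt : ∀ w ∈ vs', w < v := fun w hw => (List.pairwise_cons.mp hp).1 w hw
    have hp' := (List.pairwise_cons.mp hp).2
    have hskip : ∀ y ∈ f v, (decide (k y < k x) : Bool) = false := by
      intro y hy
      have hky : k y = v := hf v (by simp) y hy
      rcases List.mem_cons.mp hx with h | h
      · simp [hky, h]
      · have : k x < v := hlt _ h
        simp [hky]; omega
    rw [List.flatMap_cons, pvInsertBy_skip _ _ _ _ hskip]
    by_cases hvx : v = k x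
    · have hall : ∀ y ∈ vs'.flatMap f, (decide (k y < k x) : Bool) = true := by
        intro y hy
        rcases List.mem_flatMap.mp hy with ⟨w, hw, hyw⟩
        have : k y = w := hf w (by simp [hw]) y hyw
        have := hlt w hw
        simp; omega
      rw [pvInsertBy_front _ _ _ hall, List.flatMap_cons, if_pos hvx]
      have htail : vs'.flatMap (fun w => if w = k x then f w ++ [x] else f w)
          = vs'.flatMap f := by
        apply List.flatMap_congr
        intro w hw
        have : w < v := hlt w hw
        rw [if_neg (by omega)]
      rw [htail]
      simp
    · have hx' : k x ∈ vs' := by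
        rcases List.mem_cons.mp hx with h | h
        · exact absurd h.symm hvx
        · exact h
      rw [ih f hp' hx' (fun w hw => hf w (by simp [hw]))]
      rw [List.flatMap_cons, if_neg hvx]

theorem pvSorted_bucket {α : Type} (k : α → Int) :
    ∀ (l : List α) (vs : List Int),
      vs.Pairwise (fun a b => b < a) → (∀ x ∈ l, k x ∈ vs) →
      PySem.List.sorted l k true = vs.flatMap (fun v => l.filter (fun x => k x == v)) := by
  intro l
  induction l using List.reverseRecOn with
  | nil => intro vs _ _; simp [PySem.List.sorted_rev_eq_foldl_insertBy]
  | append_singleton l x ih =>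
    intro vs hp hmem
    rw [PySem.List.sorted_rev_eq_foldl_insertBy, List.foldl_append, List.foldl_cons,
        List.foldl_nil, ← PySem.List.sorted_rev_eq_foldl_insertBy,
        ih vs hp (fun y hy => hmem y (by simp [hy]))]
    rw [pvInsert_bucket k x vs _ hp (hmem x (by simp))
          (fun v _ y hy => by simpa using (List.mem_filter.mp hy).2)]
    apply List.flatMap_congr
    intro v _
    rw [List.filter_append]
    by_cases h : k x = v
    · simp [h]
    · simp [h, Ne.symm h]

-- ---- generic list plumbing ----

theorem pv_flatMap_if {α β : Type} (l : List α) (p : α → Bool) (f : α → β) :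
    (l.flatMap (fun x => if p x then [f x] else [])) = (l.filter p).map f := by
  induction l with
  | nil => rfl
  | cons x t ih =>
    by_cases h : p x <;> simp [h, ih]

theorem pv_filter_flatMap {α β : Type} (vs : List α) (g : α → List β) (p : β → Bool) :
    (vs.flatMap g).filter p = vs.flatMap (fun v => (g v).filter p) := by
  induction vs with
  | nil => rfl
  | cons v t ih => simp [List.flatMap_cons, List.filter_append, ih]

theorem pv_flatMap_guard {α β : Type} (vs : List α) (p : α → Bool) (g : α → List β) :
    vs.flatMap (fun v => if p v then g v else []) = (vs.filter p).flatMap g := by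
  induction vs with
  | nil => rfl
  | cons v t ih =>
    by_cases h : p v <;> simp [h, ih]

-- wanted counts of a tall-enough descending ladder, in order
theorem pvDesc_filter_wanted :
    ∀ (m : Nat), 9 ≤ m →
      (pvDesc m).filter (fun v => ([3, 5, 6, 7, 8, 9] : List Int).contains v)
        = [9, 8, 7, 6, 5, 3] := by
  intro m
  induction m with
  | zero => intro h; omega
  | succ n ih =>
    intro h
    by_cases hn : 9 ≤ n
    · have hbig : (([3, 5, 6, 7, 8, 9] : List Int).contains ((n + 1 : Nat) : Int)) = false := by
        simp [List.contains_eq_mem]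
        omega
      simp only [pvDesc, List.filter_cons, hbig]
      exact ih hn
    · have : n = 8 := by omega
      subst this
      decide

-- ---- per-prime equality ----

theorem pv_perPrime (prime : Int) (out : List (Int × List Int)) :
    pvLoopA prime out = out ++ pvLoopB prime := by
  unfold pvLoopA pvLoopB
  set cs := (PySem.Int.toStr prime).toList with hcs
  -- name A's key function and rewrite it to the multiplicity
  have hkey : ∀ c, (pvCountA cs).getD c 0 = ((cs.count c : Nat) : Int) := by
    intro c; rw [pvCountA_eq, PySem.Dict.getD_counter]
  have hkeys : (pvCountA cs).keys = PySem.Set.ofList cs := by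
    rw [pvCountA_eq, PySem.Dict.keys_counter]
  simp only [hkey, hkeys]
  -- A's loop is a filter-map over the sorted key list
  rw [PySem.List.foldl_append_if
        (p := fun c => ([3, 5, 6, 7, 8, 9] : List Int).contains ((cs.count c : Nat) : Int))
        (f := fun c => (prime, pvPlacesA cs c))]
  -- bucket the stable descending sort over the ladder [max(len,9) .. 1]
  have hsorted := pvSorted_bucket (fun c => ((cs.count c : Nat) : Int))
      (PySem.Set.ofList cs) (pvDesc (max cs.length 9))
      (pvDesc_pairwise _)
      (by
        intro c hc
        have hcmem : c ∈ cs := (PySem.Set.mem_ofList cs c).mp hc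
        have h0 : 0 < cs.count c := List.count_pos_iff.mpr hcmem
        have h1 : cs.count c ≤ cs.length := List.count_le_length
        have h2 : cs.length ≤ max cs.length 9 := le_max_left _ _
        rw [pvDesc_mem]
        simp only []
        omega)
  rw [hsorted, pv_filter_flatMap]
  -- inside one bucket the wanted-test is constant
  have hbuck : ∀ v ∈ pvDesc (max cs.length 9),
      ((PySem.Set.ofList cs).filter (fun c => ((cs.count c : Nat) : Int) == v)).filter
          (fun c => ([3, 5, 6, 7, 8, 9] : List Int).contains ((cs.count c : Nat) : Int))
        = if ([3, 5, 6, 7, 8, 9] : List Int).contains v then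
            (PySem.Set.ofList cs).filter (fun c => ((cs.count c : Nat) : Int) == v)
          else [] := by
    intro v _
    by_cases hw : ([3, 5, 6, 7, 8, 9] : List Int).contains v
    · rw [if_pos hw, List.filter_eq_self.mpr]
      intro c hc
      have : ((cs.count c : Nat) : Int) = v := by simpa using (List.mem_filter.mp hc).2
      rw [this]; exact hw
    · rw [if_neg hw, List.filter_eq_nil_iff.mpr]
      intro c hc
      have : ((cs.count c : Nat) : Int) = v := by simpa using (List.mem_filter.mp hc).2
      rw [this]; simpa using hw
  rw [List.flatMap_congr hbuck]
  rw [pv_flatMap_guard, pvDesc_filter_wanted (max cs.length 9) (le_max_right _ _)]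
  -- now reshape B's side into the same six buckets
  have hvals : (pvPosB cs).values
      = (PySem.Set.ofList cs).map (fun c => (pvPosB cs).getD c []) := by
    rw [PySem.Dict.values_eq_map_keys (pvPosB cs) (pvKeysB_nodup cs) [], pvKeysB_eq]
  congr 1
  rw [List.map_flatMap]
  apply List.flatMap_congr
  intro v _
  rw [pv_flatMap_if, hvals, List.filter_map, List.map_map]
  have hpred : ((fun places => ((List.length places : Nat) : Int) == v) ∘
        (fun c => (pvPosB cs).getD c []))
      = (fun c => ((cs.count c : Nat) : Int) == v) := by
    funext c
    simp only [Function.comp]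
    rw [pvPosB_length]
  rw [hpred]
  apply List.map_congr_left
  intro c hc
  simp only [Function.comp]
  rw [pvPlacesA_eq]

-- ===== VERDICT (by name: the statement is the Claim_ definition above) =====
theorem primesWithRepeatedDigitsSearch_spec : Claim_equal_primesWithRepeatedDigitsSearch := by
  intro primes _
  unfold Spec_primesWithRepeatedDigitsSearch
  unfold primesWithRepeatedDigitsSearch primesWithRepeatedDigitsSearch_alt
  rw [PySem.List.foldl_congr_mem _ _
        (fun (out : List (Int × List Int)) prime => out ++ pvLoopB prime) _
        (by intro acc p _; exact pv_perPrime p acc),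
      PySem.List.foldl_append_eq_flatMap]
  simp
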